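-- pv_equiv track=rewrite | github.com/bnnm/vgm-tools | misc/ragewords/rrnames-fixer.py | order_list
-- ===== SOURCE A (Python) =====
-- CLEAN_ORDER = True
--
-- def sorter(elem):
--     pos = 0
--     item = elem.lower()
--     if not elem:
--         pos = 10
--     elif elem[0].isdigit():
--         pos = 1
--     elif elem[0] == '#':
--         pos = 2
--         item = None # don't change order vs original (sometimes follows dev order)
--     return (pos, item)
--
-- def order_list(clines):
--     if not CLEAN_ORDER:
--         return clines
--
--     lines = [] #final list
--
--     section = None
--     slines = [] #temp section list
--
--     for line in clines:
--         s_end = not line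
--         s_start = line.startswith('### ')
--
--         if (s_end or s_start) and section:
--             # section end
--             if slines: #only if section has something
--                 slines.sort(key=sorter)
--                 lines.append(section)
--                 lines.extend(slines)
--             section = None
--             slines = []
--
--         if s_start:
--             # register section header
--             section = line
--             continue
--
--         if section:
--             # lines within section
--             slines.append(line)
--         else:
--             # any other
--             lines.append(line)
--
--     # trailing section
--     if section and slines:
--         slines.sort(key=sorter)
--         lines.append(section)
--         lines.extend(slines)
--
--     return lines
-- ===== SOURCE B (Python) =====
-- CLEAN_ORDER = True
--
-- def sorter(elem):
--     pos = 0
--     item = elem.lower()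
--     if not elem:
--         pos = 10
--     elif elem[0].isdigit():
--         pos = 1
--     elif elem[0] == '#':
--         pos = 2
--         item = None # don't change order vs original (sometimes follows dev order)
--     return (pos, item)
--
-- def _take_body(clines, i):
--     # longest run of lines from position i that stays inside a section body
--     body = []
--     n = len(clines)
--     while i < n:
--         l = clines[i]
--         if not l or l.startswith('### '):
--             break
--         body.append(l)
--         i += 1
--     return body, i
--
-- def _tokenize(clines):
--     # tokens: plain string = loose line; (header, body) = a section group.
--     # the terminator (blank line / next header) is NOT consumed by a group.
--     toks = []
--     i = 0
--     n = len(clines)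
--     while i < n:
--         line = clines[i]
--         i += 1
--         if line.startswith('### '):
--             body, i = _take_body(clines, i)
--             toks.append((line, body))
--         else:
--             toks.append(line)
--     return toks
--
-- def order_list(clines):
--     if not CLEAN_ORDER:
--         return clines
--     out = []
--     for t in _tokenize(clines):
--         if isinstance(t, tuple):
--             header, body = t
--             if body:
--                 out.append(header)
--                 out.extend(sorted(body, key=sorter))
--         else:
--             out.append(t)
--     return out
-- ===== Notes on version B (the rewrite author's own statement) =====
-- stated objective: alternative
-- what changed: Replaced A's single stateful scan (section/slines accumulators with flush logic duplicated at loop end) by a two-pass decomposition: first tokenize the lines into loose lines and (header, body) groups, then emit loose lines as-is and each non-empty group as header plus its sorted body.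
import Mathlib
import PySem

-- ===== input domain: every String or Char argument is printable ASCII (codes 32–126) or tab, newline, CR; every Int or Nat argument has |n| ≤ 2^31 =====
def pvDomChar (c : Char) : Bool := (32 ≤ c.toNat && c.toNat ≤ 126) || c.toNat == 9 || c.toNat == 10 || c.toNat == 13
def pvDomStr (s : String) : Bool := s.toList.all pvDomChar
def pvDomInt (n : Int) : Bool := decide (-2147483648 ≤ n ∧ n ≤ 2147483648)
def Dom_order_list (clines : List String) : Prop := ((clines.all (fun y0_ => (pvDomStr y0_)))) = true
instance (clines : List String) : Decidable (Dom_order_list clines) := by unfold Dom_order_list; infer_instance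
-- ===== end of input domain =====

-- B replaces A's single stateful scan with a two-pass decomposition (tokenize into
-- loose lines / (header, body) groups, then emit with each non-empty body sorted);
-- same behaviour, objective: alternative decomposition.

-- ===== PORT A =====
def CLEAN_ORDER : Bool := true

-- sorter(elem) returns (pos, item) with item = None in the '#' branch; None is only
-- ever compared against None there (pos ties), where Python finds them equal, so the
-- port renders None as "" — equal against itself, never compared across pos values.
def sorterPos (elem : String) : Int :=
  match elem.toList with
  | [] => 10
  | c :: _ => if PySem.Chars.isdigit c then 1 else if c = '#' then 2 else 0

def sorterItem (elem : String) : String :=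
  if sorterPos elem = 2 then "" else PySem.Str.lower elem

-- slines.sort(key=sorter)  (tuple key → PySem.List.sorted2)
def sortSec (slines : List String) : List String :=
  PySem.List.sorted2 slines sorterPos sorterItem

-- one iteration of A's for-loop; state = (lines, section, slines)
def stepA (st : List String × Option String × List String) (line : String) :
    List String × Option String × List String :=
  let s_end := line == ""
  let s_start := PySem.Str.startswith line "### "
  let st2 :=
    if (s_end || s_start) && st.2.1.isSome then
      ((if st.2.2 ≠ [] then st.1 ++ [st.2.1.getD ""] ++ sortSec st.2.2 else st.1),
       (none : Option String), ([] : List String))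
    else st
  if s_start then (st2.1, some line, st2.2.2)
  else
    match st2.2.1 with
    | some h => (st2.1, some h, st2.2.2 ++ [line])
    | none => (st2.1 ++ [line], none, st2.2.2)

def order_list (clines : List String) : List String :=
  if !CLEAN_ORDER then clines
  else
    let fin := clines.foldl stepA ([], none, [])
    match fin.2.1 with
    | some h => if fin.2.2 ≠ [] then fin.1 ++ [h] ++ sortSec fin.2.2 else fin.1
    | none => fin.1

-- ===== PORT B =====
inductive Tok
  | loose : String → Tok
  | group : String → List String → Tok
deriving DecidableEq, Repr

-- a line that stays inside a section body (not blank, not a header)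
def pBody (l : String) : Bool := !(l == "" || PySem.Str.startswith l "### ")

-- _take_body: longest body prefix, plus the remaining lines
def takeBody : List String → List String × List String
  | [] => ([], [])
  | l :: ls =>
    if pBody l then
      let r := takeBody ls
      (l :: r.1, r.2)
    else ([], l :: ls)

theorem takeBody_snd_length_le (ls : List String) : (takeBody ls).2.length ≤ ls.length := by
  induction ls with
  | nil => simp [takeBody]
  | cons l ls ih =>
    simp only [takeBody]
    split
    · simpa using Nat.le_succ_of_le ih
    · simp

def tokenize : List String → List Tok
  | [] => []
  | line :: rest =>
    if PySem.Str.startswith line "### " then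
      let br := takeBody rest
      Tok.group line br.1 :: tokenize br.2
    else
      Tok.loose line :: tokenize rest
termination_by ls => ls.length
decreasing_by
  · exact Nat.lt_succ_of_le (takeBody_snd_length_le rest)
  · simp

def order_list_alt (clines : List String) : List String :=
  if !CLEAN_ORDER then clines
  else
    (tokenize clines).foldl
      (fun out t =>
        match t with
        | Tok.loose l => out ++ [l]
        | Tok.group h body => if body ≠ [] then out ++ [h] ++ sortSec body else out)
      []

-- ===== PRECONDITION & SPEC =====
def Spec_order_list (clines : List String) (out : List String) : Prop := out = order_list_alt clines
instance (clines : List String) (out : List String) : Decidable (Spec_order_list clines out) := by unfold Spec_order_list; infer_instance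

-- ===== CLAIM (what is proved, stated in full; the proofs are below) =====
def Claim_equal_order_list : Prop := ∀ (clines : List String), Dom_order_list clines → Spec_order_list clines (order_list clines)

-- ===== LEMMAS AND PROOFS =====

-- final flush of A's loop state
def finishA (st : List String × Option String × List String) : List String :=
  match st.2.1 with
  | some h => if st.2.2 ≠ [] then st.1 ++ [h] ++ sortSec st.2.2 else st.1
  | none => st.1

def runA (st : List String × Option String × List String) (cs : List String) : List String :=
  finishA (cs.foldl stepA st)

def emitTok (t : Tok) : List String :=
  match t with
  | Tok.loose l => [l]
  | Tok.group h body => if body ≠ [] then [h] ++ sortSec body else []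

theorem order_list_eq_runA (clines : List String) :
    order_list clines = runA ([], none, []) clines := by
  simp [order_list, runA, finishA, CLEAN_ORDER]

theorem order_list_alt_eq_flatMap (clines : List String) :
    order_list_alt clines = (tokenize clines).flatMap emitTok := by
  simp only [order_list_alt, CLEAN_ORDER, Bool.not_true, Bool.false_eq_true, if_false]
  rw [PySem.List.foldl_congr_mem (tokenize clines) _ (fun out t => out ++ emitTok t) []
    (by intro acc t _; cases t with
        | loose l => rfl
        | group h body => by_cases hb : body = [] <;> simp [emitTok, hb])]
  simpa using PySem.List.foldl_append_eq_flatMap emitTok (tokenize clines) []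

-- inside a section, A flushes exactly the pBody-prefix of the remaining lines
theorem runA_section (cs : List String) :
    ∀ (lines sl : List String) (h : String),
      runA (lines, some h, sl) cs =
        runA (lines ++ (if sl ++ (takeBody cs).1 ≠ [] then [h] ++ sortSec (sl ++ (takeBody cs).1) else []),
              none, []) (takeBody cs).2 := by
  induction cs with
  | nil =>
    intro lines sl h
    by_cases hsl : sl = [] <;> simp [runA, finishA, takeBody, hsl]  -- nil case
  | cons c cs ih =>
    intro lines sl h
    by_cases hp : pBody c = true
    · have hp' := hp
      simp [pBody] at hp'
      have hstep : stepA (lines, some h, sl) c = (lines, some h, sl ++ [c]) := by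
        simp [stepA, hp'.1, hp'.2]
      have htb : takeBody (c :: cs) = ((c :: (takeBody cs).1), (takeBody cs).2) := by
        simp [takeBody, hp]
      rw [htb]
      show runA (stepA (lines, some h, sl) c) cs = _
      rw [hstep, ih lines (sl ++ [c]) h]
      have hne1 : (sl ++ [c] ++ (takeBody cs).1 ≠ []) := by simp
      have hne2 : (sl ++ c :: (takeBody cs).1 ≠ []) := by simp
      simp only [hne1, hne2, if_pos, ne_eq, not_false_iff]
      congr 2; simp
    · -- c ends the section: flush now, then re-process c from the empty state
      have hor : c = "" ∨ PySem.Str.startswith c "### " = true := by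
        have hcond : (c == "" || PySem.Str.startswith c "### ") = true := by
          revert hp; unfold pBody
          cases hb : (c == "" || PySem.Str.startswith c "### ") <;> simp
        simpa only [Bool.or_eq_true, beq_iff_eq] using hcond
      have hflush : stepA (lines, some h, sl) c
          = stepA (lines ++ (if sl ≠ [] then [h] ++ sortSec sl else []), none, []) c := by
        rcases hor with hc | hsw
        · subst hc
          by_cases hsl : sl = [] <;> simp [stepA, hsl]
        · have hsw' : PySem.Chars.startswith c.toList ['#', '#', '#', ' '] = true := by
            simpa using hsw
          by_cases hsl : sl = [] <;> simp [stepA, hsl, hsw']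
      have htb : takeBody (c :: cs) = ([], c :: cs) := by
        simp [takeBody, hp]
      rw [htb]
      show runA (stepA (lines, some h, sl) c) cs = _
      rw [hflush]
      simp only [List.append_nil]
      rfl

theorem runA_none (cs : List String) :
    ∀ (lines : List String),
      runA (lines, none, []) cs = lines ++ (tokenize cs).flatMap emitTok := by
  induction cs using tokenize.induct with
  | case1 => intro lines; simp [runA, finishA, tokenize]
  | case2 line rest hs br ih =>
    intro lines
    have hs' : PySem.Chars.startswith line.toList ['#', '#', '#', ' '] = true := by
      simpa using hs
    have hstep : stepA (lines, none, []) line = (lines, some line, []) := by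
      simp [stepA, hs']
    show runA (stepA (lines, none, []) line) rest = _
    rw [hstep, runA_section rest lines [] line]
    simp only [List.nil_append]
    rw [show takeBody rest = br from rfl, ih]
    rw [tokenize, show takeBody rest = br from rfl]
    by_cases hb : br.1 = [] <;> simp [hs', emitTok, hb]
  | case3 line rest hs ih =>
    intro lines
    have hs' : PySem.Chars.startswith line.toList ['#', '#', '#', ' '] = false := by
      simpa using hs
    have hstep : stepA (lines, none, []) line = (lines ++ [line], none, []) := by
      simp [stepA, hs']
    show runA (stepA (lines, none, []) line) rest = _
    rw [hstep, ih]
    rw [tokenize]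
    simp [hs', emitTok]

-- ===== VERDICT (by name: the statement is the Claim_ definition above) =====
theorem order_list_spec : Claim_equal_order_list := by
  intro clines _
  show order_list clines = order_list_alt clines
  rw [order_list_eq_runA, order_list_alt_eq_flatMap, runA_none clines []]
  simp
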